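-- pv_equiv track=rewrite | github.com/DaltonGoesFast/shattered-pixel-dungeon-qol | Lastest UI/spd_parser.py | seed_to_string
-- ===== SOURCE A (Python) =====
-- def seed_to_string(num: int) -> str:
--     """Convert a numerical seed to the SPD alphanumeric format (e.g. YZB-SGH-FWF)"""
--     if num is None:
--         return ""
--
--     # Following the logic from DungeonSeed.java in SPD source:
--     # 1. Convert to base 26 string where digits are 0-9 and letters are a-p
--     alphabet = "0123456789abcdefghijklmnopqrstuvwxyz"
--     interim = ""
--     n = int(num)
--     if n == 0:
--         interim = "0"
--     else:
--         while n > 0: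
--             interim = alphabet[n % 26] + interim
--             n //= 26
--
--     # 2. Map characters to A-Z and pad with 'A'
--     mapped = ""
--     for c in interim:
--         if '0' <= c <= '9':
--             mapped += chr(ord(c) + 17) # 0-9 -> A-J
--         else:
--             mapped += chr(ord(c) - 22) # a-p -> K-Z
--
--     # Pad with 'A' until length is 9
--     while len(mapped) < 9:
--         mapped = "A" + mapped
--
--     # 3. Format with dashes: XXX-XXX-XXX
--     return f"{mapped[:3]}-{mapped[3:6]}-{mapped[6:]}"
-- ===== SOURCE B (Python) =====
-- def seed_to_string(num: int) -> str:
--     """Convert a numerical seed to the SPD alphanumeric format (e.g. YZB-SGH-FWF)"""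
--     if num is None:
--         return ""
--     n = int(num)
--     digits = []
--     while n > 0:
--         digits.append(chr(65 + n % 26))  # base-26 digit mapped straight to A..Z
--         n //= 26
--     s = ''.join(reversed(digits)).rjust(9, 'A')
--     return f"{s[:3]}-{s[3:6]}-{s[6:]}"
-- ===== Notes on version B (the rewrite author's own statement) =====
-- stated objective: simpler
-- what changed: Fuses A's two passes (build a base-26 digit string via an alphabet table, then remap each character in a second loop) into a single division loop that emits chr(65 + n % 26) directly, collects digits least-significant-first, and pads with str.rjust instead of a prepend loop.
import Mathlib
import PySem

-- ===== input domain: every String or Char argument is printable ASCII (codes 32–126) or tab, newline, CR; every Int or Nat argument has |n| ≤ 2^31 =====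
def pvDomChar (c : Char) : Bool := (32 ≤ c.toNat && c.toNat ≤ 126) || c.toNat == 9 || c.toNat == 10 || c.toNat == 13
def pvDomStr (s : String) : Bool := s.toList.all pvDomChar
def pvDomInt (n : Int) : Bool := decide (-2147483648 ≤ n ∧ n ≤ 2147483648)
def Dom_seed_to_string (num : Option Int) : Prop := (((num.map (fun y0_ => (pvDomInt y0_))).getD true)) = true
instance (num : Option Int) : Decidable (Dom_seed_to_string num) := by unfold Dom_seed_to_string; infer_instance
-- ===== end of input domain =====

-- B fuses A's two passes (base-26 digit string + remap loop) into one division loop emitting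
-- chr(65+d) directly, building the core back-to-front and padding with rjust (objective: simpler).


-- ===== PORT A =====
def pvAlphabet : List Char := "0123456789abcdefghijklmnopqrstuvwxyz".toList

-- A's while loop: interim = alphabet[n % 26] + interim; n //= 26
def pvInterimA (n : Int) : List Char :=
  if h : 0 < n then
    pvInterimA (PySem.Int.floordiv n 26) ++
      [PySem.List.pyGetD pvAlphabet (PySem.Int.mod n 26) ' ']   -- `.getD ' '` for totality; index is always 0..25
  else []
termination_by n.toNat
decreasing_by
  rw [PySem.Int.floordiv_eq_ediv_of_pos (by norm_num : (0:Int) < 26)]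
  omega

-- the second pass: '0'-'9' → +17 (A-J), 'a'-'p' → -22 (K-Z)
def pvMapA (c : Char) : Char :=
  if '0' ≤ c ∧ c ≤ '9' then Char.ofNat (c.toNat + 17) else Char.ofNat (c.toNat - 22)

-- while len(mapped) < 9: mapped = "A" + mapped
def pvPadA (l : List Char) : List Char :=
  if l.length < 9 then pvPadA ('A' :: l) else l
termination_by 9 - l.length

def seed_to_string (num : Option Int) : String :=
  match num with
  | none => ""
  | some n =>
    let interim : List Char := if n = 0 then ['0'] else pvInterimA n
    let mapped : List Char := interim.map pvMapA
    let padded : List Char := pvPadA mapped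
    String.ofList (PySem.List.slice padded none (some 3) ++ ('-' ::
      (PySem.List.slice padded (some 3) (some 6) ++ ('-' ::
        PySem.List.slice padded (some 6) none))))

-- ===== PORT B =====
-- B's while loop: digits.append(chr(65 + n % 26)); n //= 26
def pvDigitsB (n : Int) : List Char :=
  if h : 0 < n then
    Char.ofNat (65 + (PySem.Int.mod n 26).toNat) :: pvDigitsB (PySem.Int.floordiv n 26)
  else []
termination_by n.toNat
decreasing_by
  rw [PySem.Int.floordiv_eq_ediv_of_pos (by norm_num : (0:Int) < 26)]
  omega

def seed_to_string_alt (num : Option Int) : String :=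
  match num with
  | none => ""
  | some n =>
    let core : List Char := (pvDigitsB n).reverse
    let s : List Char :=                                     -- ''.join(reversed(digits)).rjust(9, 'A')
      if core.length < 9 then List.replicate (9 - core.length) 'A' ++ core else core
    String.ofList (PySem.List.slice s none (some 3) ++ ('-' ::
      (PySem.List.slice s (some 3) (some 6) ++ ('-' ::
        PySem.List.slice s (some 6) none))))

-- ===== PRECONDITION & SPEC =====
def Spec_seed_to_string (num : Option Int) (out : String) : Prop := out = seed_to_string_alt num
instance (num : Option Int) (out : String) : Decidable (Spec_seed_to_string num out) := by unfold Spec_seed_to_string; infer_instance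

-- ===== CLAIM (what is proved, stated in full; the proofs are below) =====
def Claim_equal_seed_to_string : Prop := ∀ (num : Option Int), Dom_seed_to_string num → Spec_seed_to_string num (seed_to_string num)

-- ===== LEMMAS AND PROOFS =====

-- A's digit (alphabet lookup then remap) equals B's direct chr(65+d), for every digit 0..25
theorem pvMap_digit (k : Nat) (hk : k < 26) :
    pvMapA (PySem.List.pyGetD pvAlphabet (k : Int) ' ') = Char.ofNat (65 + k) := by
  interval_cases k <;> decide

-- the fused loop of B produces exactly the remap of A's interim string, reversed
set_option maxRecDepth 4096 in
theorem pvInterim_map (n : Int) :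
    (pvInterimA n).map pvMapA = (pvDigitsB n).reverse := by
  rw [pvInterimA, pvDigitsB]
  by_cases h : 0 < n
  · rw [dif_pos h, dif_pos h, List.map_append, pvInterim_map (PySem.Int.floordiv n 26),
      List.reverse_cons]
    have h26 : (0:Int) < 26 := by norm_num
    have hnn := PySem.Int.mod_nonneg n h26
    have hlt := PySem.Int.mod_lt n h26
    have hcast : PySem.Int.mod n 26 = ((PySem.Int.mod n 26).toNat : Int) := by omega
    have hk : (PySem.Int.mod n 26).toNat < 26 := by omega
    rw [hcast]
    simp only [List.map_cons, List.map_nil, Int.toNat_natCast]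
    rw [pvMap_digit _ hk]
  · rw [dif_neg h, dif_neg h]; rfl
termination_by n.toNat
decreasing_by
  rw [PySem.Int.floordiv_eq_ediv_of_pos (by norm_num : (0:Int) < 26)]
  omega

-- A's prepend-'A' loop is a replicate pad
theorem pvPad_eq (l : List Char) :
    pvPadA l = List.replicate (9 - l.length) 'A' ++ l := by
  rw [pvPadA]
  by_cases h : l.length < 9
  · rw [if_pos h, pvPad_eq ('A' :: l)]
    have : 9 - l.length = (9 - ('A' :: l).length) + 1 := by simp; omega
    rw [this, List.replicate_succ', List.append_assoc]
    rfl
  · rw [if_neg h]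
    have : 9 - l.length = 0 := by omega
    simp [this]
termination_by 9 - l.length

-- ===== VERDICT (by name: the statement is the Claim_ definition above) =====
theorem seed_to_string_spec : Claim_equal_seed_to_string := by
  intro num _
  unfold Spec_seed_to_string seed_to_string seed_to_string_alt
  match num with
  | none => rfl
  | some n =>
    simp only
    have key : pvPadA ((if n = 0 then ['0'] else pvInterimA n).map pvMapA) =
        (if (pvDigitsB n).reverse.length < 9 then
          List.replicate (9 - (pvDigitsB n).reverse.length) 'A' ++ (pvDigitsB n).reverse
        else (pvDigitsB n).reverse) := by
      by_cases h0 : n = 0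
      · subst h0
        have hd : pvDigitsB 0 = [] := by rw [pvDigitsB]; simp
        rw [if_pos rfl, hd, pvPad_eq]
        decide
      · rw [if_neg h0, pvInterim_map n, pvPad_eq]
        by_cases h : (pvDigitsB n).reverse.length < 9
        · rw [if_pos h]
        · rw [if_neg h]
          have h9 : 9 - (pvDigitsB n).reverse.length = 0 := by omega
          rw [h9]
          simp
    rw [key]
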